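-- pv_equiv track=rewrite | github.com/aizere77/PP2 | TSIS/TSIS2/paint.py | palette_click
-- ===== SOURCE A (Python) =====
-- PALETTE_H = 50        # bottom colour palette
--
-- PALETTE_COLORS = [
--     (0,   0,   0),    (255, 255, 255), (128, 128, 128), (192, 192, 192),
--     (255,   0,   0),  (128,   0,   0), (255, 128,   0), (128,  64,   0),
--     (255, 255,   0),  (128, 128,   0), (  0, 255,   0), (  0, 128,   0),
--     (  0, 255, 255),  (  0, 128, 128), (  0,   0, 255), (  0,   0, 128),
--     (255,   0, 255),  (128,   0, 128), (255, 128, 128), (128, 255, 128),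
-- ]
--
-- def palette_click(pos, toolbar_h, canvas_h):
--     """Return palette colour under pos, or None."""
--     px, py = pos
--     y0 = toolbar_h + canvas_h
--     if py < y0 or py >= y0 + PALETTE_H:
--         return None
--     swatch_size = 36
--     pad = 6
--     for i, col in enumerate(PALETTE_COLORS):
--         rx = pad + i * (swatch_size + pad)
--         if rx <= px <= rx + swatch_size:
--             return col
--     return None
-- ===== SOURCE B (Python) =====
-- PALETTE_H = 50        # bottom colour palette
--
-- PALETTE_COLORS = [
--     (0,   0,   0),    (255, 255, 255), (128, 128, 128), (192, 192, 192),
--     (255,   0,   0),  (128,   0,   0), (255, 128,   0), (128,  64,   0),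
--     (255, 255,   0),  (128, 128,   0), (  0, 255,   0), (  0, 128,   0),
--     (  0, 255, 255),  (  0, 128, 128), (  0,   0, 255), (  0,   0, 128),
--     (255,   0, 255),  (128,   0, 128), (255, 128, 128), (128, 255, 128),
-- ]
--
-- def palette_click(pos, toolbar_h, canvas_h):
--     """Return palette colour under pos, or None (closed-form index, no scan)."""
--     px, py = pos
--     y0 = toolbar_h + canvas_h
--     if py < y0 or py >= y0 + PALETTE_H:
--         return None
--     swatch_size = 36
--     pad = 6
--     step = swatch_size + pad
--     offset = px - pad
--     i, r = divmod(offset, step)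
--     if offset >= 0 and i < len(PALETTE_COLORS) and r <= swatch_size:
--         return PALETTE_COLORS[i]
--     return None
-- ===== Notes on version B (the rewrite author's own statement) =====
-- stated objective: simpler
-- what changed: Replaces the 20-iteration enumerate scan over PALETTE_COLORS with a single closed-form divmod((px - pad), swatch_size + pad) index computation plus a remainder check for the inter-swatch gap.
import Mathlib
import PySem

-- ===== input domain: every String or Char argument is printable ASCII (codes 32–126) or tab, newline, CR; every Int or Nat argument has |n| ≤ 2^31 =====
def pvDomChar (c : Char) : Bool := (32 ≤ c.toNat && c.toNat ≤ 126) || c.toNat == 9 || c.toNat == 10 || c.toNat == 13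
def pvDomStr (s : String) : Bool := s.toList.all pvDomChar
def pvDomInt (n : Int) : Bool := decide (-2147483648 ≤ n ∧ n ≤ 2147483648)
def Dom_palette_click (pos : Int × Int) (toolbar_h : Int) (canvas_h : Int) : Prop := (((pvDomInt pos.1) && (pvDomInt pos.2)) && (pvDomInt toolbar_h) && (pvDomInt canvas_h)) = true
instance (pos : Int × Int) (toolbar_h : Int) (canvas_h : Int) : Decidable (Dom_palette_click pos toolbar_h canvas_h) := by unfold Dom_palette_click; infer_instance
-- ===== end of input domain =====

-- B replaces A's linear scan over the palette by a closed-form divmod index computation (simpler, no loop).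
-- ===== PORT A =====
def paletteColors : List (Int × Int × Int) := [
  (0, 0, 0), (255, 255, 255), (128, 128, 128), (192, 192, 192),
  (255, 0, 0), (128, 0, 0), (255, 128, 0), (128, 64, 0),
  (255, 255, 0), (128, 128, 0), (0, 255, 0), (0, 128, 0),
  (0, 255, 255), (0, 128, 128), (0, 0, 255), (0, 0, 128),
  (255, 0, 255), (128, 0, 128), (255, 128, 128), (128, 255, 128)]

-- the 'for i, col in enumerate(PALETTE_COLORS)' loop with early return
def paletteLoopA (px : Int) : Int → List (Int × Int × Int) → Option (Int × Int × Int)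
  | _, [] => none
  | i, col :: rest =>
    let rx : Int := 6 + i * (36 + 6)
    if rx ≤ px ∧ px ≤ rx + 36 then some col else paletteLoopA px (i + 1) rest

def palette_click (pos : Int × Int) (toolbar_h : Int) (canvas_h : Int) : Option (Int × Int × Int) :=
  let px := pos.1
  let py := pos.2
  let y0 := toolbar_h + canvas_h
  if py < y0 ∨ py ≥ y0 + 50 then none
  else paletteLoopA px 0 paletteColors

-- ===== PORT B =====
def palette_click_alt (pos : Int × Int) (toolbar_h : Int) (canvas_h : Int) : Option (Int × Int × Int) :=
  let px := pos.1
  let py := pos.2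
  let y0 := toolbar_h + canvas_h
  if py < y0 ∨ py ≥ y0 + 50 then none
  else
    let step : Int := 36 + 6
    let offset : Int := px - 6
    let i := PySem.Int.floordiv offset step
    let r := PySem.Int.mod offset step
    if 0 ≤ offset ∧ i < (paletteColors.length : Int) ∧ r ≤ 36 then
      PySem.List.pyGet? paletteColors i   -- PALETTE_COLORS[i]; in range under the guard
    else none
-- ===== PRECONDITION & SPEC =====
def Spec_palette_click (pos : Int × Int) (toolbar_h : Int) (canvas_h : Int) (out : Option (Int × Int × Int)) : Prop := out = palette_click_alt pos toolbar_h canvas_h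
instance (pos : Int × Int) (toolbar_h : Int) (canvas_h : Int) (out : Option (Int × Int × Int)) : Decidable (Spec_palette_click pos toolbar_h canvas_h out) := by unfold Spec_palette_click; infer_instance

-- ===== CLAIM (what is proved, stated in full; the proofs are below) =====
def Claim_equal_palette_click : Prop := ∀ (pos : Int × Int) (toolbar_h : Int) (canvas_h : Int), Dom_palette_click pos toolbar_h canvas_h → Spec_palette_click pos toolbar_h canvas_h (palette_click pos toolbar_h canvas_h)

-- ===== LEMMAS AND PROOFS =====
-- A's scan returns none once px is left of every remaining swatch
lemma loop_none_low (px : Int) : ∀ (l : List (Int × Int × Int)) (i : Int),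
    px < 6 + i * 42 → paletteLoopA px i l = none := by
  intro l
  induction l with
  | nil => intro i _; rfl
  | cons c t ih =>
    intro i h
    show (if 6 + i * (36 + 6) ≤ px ∧ px ≤ 6 + i * (36 + 6) + 36 then some c
          else paletteLoopA px (i + 1) t) = none
    rw [if_neg (by omega)]
    exact ih (i + 1) (by omega)

-- A's scan returns none once px is right of every remaining swatch
lemma loop_none_high (px : Int) : ∀ (l : List (Int × Int × Int)) (i : Int),
    42 * (i + (l.length : Int)) < px → paletteLoopA px i l = none := by
  intro l
  induction l with
  | nil => intro i _; rfl
  | cons c t ih =>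
    intro i h
    have hlen : ((c :: t).length : Int) = (t.length : Int) + 1 := by
      simp [List.length_cons]
    rw [hlen] at h
    show (if 6 + i * (36 + 6) ≤ px ∧ px ≤ 6 + i * (36 + 6) + 36 then some c
          else paletteLoopA px (i + 1) t) = none
    rw [if_neg (by omega)]
    exact ih (i + 1) (by omega)

set_option maxHeartbeats 4000000 in
-- the px-only part: A's scan equals B's closed-form lookup
lemma core (px : Int) :
    paletteLoopA px 0 paletteColors =
    (if 0 ≤ px - 6 ∧ PySem.Int.floordiv (px - 6) (36 + 6) < (paletteColors.length : Int) ∧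
        PySem.Int.mod (px - 6) (36 + 6) ≤ 36 then
      PySem.List.pyGet? paletteColors (PySem.Int.floordiv (px - 6) (36 + 6)) else none) := by
  rw [PySem.Int.floordiv_eq_ediv_of_pos (by norm_num), PySem.Int.mod_eq_emod_of_pos (by norm_num)]
  by_cases h1 : px < 6
  · rw [if_neg (by omega), loop_none_low px paletteColors 0 (by omega)]
  by_cases h2 : px ≤ 846
  · have h1' : 6 ≤ px := by omega
    interval_cases px <;> decide
  · have hlen : (paletteColors.length : Int) = 20 := by decide
    rw [if_neg (by rw [hlen]; omega), loop_none_high px paletteColors 0 (by rw [hlen]; omega)]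

-- ===== VERDICT (by name: the statement is the Claim_ definition above) =====
theorem palette_click_spec : Claim_equal_palette_click := by
  intro pos toolbar_h canvas_h _
  unfold Spec_palette_click palette_click palette_click_alt
  by_cases hy : pos.2 < toolbar_h + canvas_h ∨ pos.2 ≥ toolbar_h + canvas_h + 50
  · simp [hy]
  · simp only [if_neg hy]
    exact core pos.1
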